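-- pv_equiv track=rewrite | github.com/YBIGTA/26th-summer-YbigtaSearchAgent | src/backend/nlp/text_processor.py | _extract_by_tfidf
-- ===== SOURCE A (Python) =====
-- from typing import List, Dict, Any, Optional, Set, Tuple
-- from collections import Counter
--
-- def _extract_by_tfidf(tokens: List[str], top_k: int) -> List[str]:
--     """TF-IDF 기반 키워드 추출 (간단 구현)"""
--
--     # 단일 문서이므로 TF만 고려
--     counter = Counter(tokens)
--     total_tokens = len(tokens)
--
--     # TF 점수 계산
--     tf_scores = {}
--     for word, count in counter.items():
--         tf_scores[word] = count / total_tokens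
--
--     # 점수순 정렬
--     sorted_words = sorted(tf_scores.items(), key=lambda x: x[1], reverse=True)
--     return [word for word, score in sorted_words[:top_k]]
-- ===== SOURCE B (Python) =====
-- from typing import List
-- from collections import Counter
--
-- def _extract_by_tfidf(tokens: List[str], top_k: int) -> List[str]:
--     """Top-k tokens by frequency via bucket (counting) sort; no float TF needed."""
--     counter = Counter(tokens)
--     n = len(tokens)
--     buckets = [[] for _ in range(n + 1)]
--     for word, count in counter.items():
--         buckets[count].append(word)
--     ordered = []
--     for c in range(n, 0, -1):
--         ordered.extend(buckets[c])
--     return ordered[:top_k]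
-- ===== Notes on version B (the rewrite author's own statement) =====
-- stated objective: alternative
-- what changed: Replaces the float TF computation plus comparison sort by a counting/bucket sort: Counter items are dropped into frequency buckets and the buckets are concatenated from highest count down, then sliced [:top_k].
import Mathlib
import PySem

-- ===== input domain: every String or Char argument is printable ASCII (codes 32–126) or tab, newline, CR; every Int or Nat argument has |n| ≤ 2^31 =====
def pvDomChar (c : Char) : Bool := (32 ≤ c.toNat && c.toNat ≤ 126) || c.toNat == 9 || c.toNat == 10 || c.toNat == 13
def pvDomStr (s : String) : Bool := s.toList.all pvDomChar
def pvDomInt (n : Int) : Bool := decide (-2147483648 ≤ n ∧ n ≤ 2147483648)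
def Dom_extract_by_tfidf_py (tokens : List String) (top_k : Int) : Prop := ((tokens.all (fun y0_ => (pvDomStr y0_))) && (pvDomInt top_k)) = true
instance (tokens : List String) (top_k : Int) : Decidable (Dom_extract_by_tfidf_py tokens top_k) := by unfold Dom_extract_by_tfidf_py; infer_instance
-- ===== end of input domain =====

-- B replaces A's float-TF + stable comparison sort by a counting/bucket sort over frequencies (alternative algorithm, same result).

-- ===== PORT A =====
-- The float TF score count/total is ported as ℚ; exact for the resulting order: for one fixed
-- positive denominator both the float and the rational quotient are strictly monotone in the count.
def extract_by_tfidf_py (tokens : List String) (top_k : Int) : List String :=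
  let counter := PySem.Dict.counter tokens
  let total_tokens : Int := tokens.length
  let tf_scores : PySem.Dict String ℚ :=
    counter.items.foldl (fun d wc => d.insert wc.1 ((wc.2 : ℚ) / (total_tokens : ℚ))) PySem.Dict.empty
  let sorted_words := PySem.List.sorted tf_scores.items (fun x => x.2) true
  (PySem.List.slice sorted_words none (some top_k)).map (fun p => p.1)

-- ===== PORT B =====
def extract_by_tfidf_py_alt (tokens : List String) (top_k : Int) : List String :=
  let counter := PySem.Dict.counter tokens
  let n := tokens.length
  let buckets := counter.items.foldl
      (fun (bs : List (List String)) wc => bs.set wc.2.toNat (bs.getD wc.2.toNat [] ++ [wc.1]))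
      (List.replicate (n + 1) [])
  let ordered := (PySem.List.pyRange (n : Int) 0 (-1)).foldl (fun acc c => acc ++ buckets.getD c.toNat []) []
  PySem.List.slice ordered none (some top_k)

-- ===== PRECONDITION & SPEC =====
def Spec_extract_by_tfidf_py (tokens : List String) (top_k : Int) (out : List String) : Prop := out = extract_by_tfidf_py_alt tokens top_k
instance (tokens : List String) (top_k : Int) (out : List String) : Decidable (Spec_extract_by_tfidf_py tokens top_k out) := by unfold Spec_extract_by_tfidf_py; infer_instance

-- ===== CLAIM (what is proved, stated in full; the proofs are below) =====
def Claim_equal_extract_by_tfidf_py : Prop := ∀ (tokens : List String) (top_k : Int), Dom_extract_by_tfidf_py tokens top_k → Spec_extract_by_tfidf_py tokens top_k (extract_by_tfidf_py tokens top_k)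

-- ===== LEMMAS AND PROOFS =====

-- slice commutes with map (PySem.List.slice only reads the length, then drops/takes).
theorem pv_slice_map {α β : Type} (g : α → β) (l : List α) (a? b? : Option Int) :
    PySem.List.slice (l.map g) a? b? = (PySem.List.slice l a? b?).map g := by
  simp [PySem.List.slice, List.map_take, List.map_drop]

-- insertBy passes over elements the new one does not go before.
theorem pv_insertBy_append {α : Type} (before : α → α → Bool) (x : α) (F R : List α)
    (hF : ∀ y ∈ F, before x y = false) :
    PySem.List.insertBy before x (F ++ R) = F ++ PySem.List.insertBy before x R := by
  induction F with
  | nil => rfl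
  | cons y F ih =>
      simp only [List.cons_append, PySem.List.insertBy, hF y (by simp)]
      simp only [Bool.false_eq_true, if_false, List.cons.injEq, true_and]
      exact ih fun z hz => hF z (by simp [hz])

-- insertBy puts the new element in front when it goes before everything.
theorem pv_insertBy_front {α : Type} (before : α → α → Bool) (x : α) (R : List α)
    (hR : ∀ y ∈ R, before x y = true) :
    PySem.List.insertBy before x R = x :: R := by
  cases R with
  | nil => rfl
  | cons y R => simp [PySem.List.insertBy, hR y (by simp)]

-- the descending-buckets decomposition of a list by an integer key
def pvBuckets {α : Type} (key : α → Int) (vs : List Int) (l : List α) : List α :=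
  vs.flatMap (fun v => l.filter (fun a => key a == v))

theorem pv_mem_buckets_key {α : Type} (key : α → Int) (vs : List Int) (l : List α)
    (y : α) (hy : y ∈ pvBuckets key vs l) : key y ∈ vs := by
  unfold pvBuckets at hy
  obtain ⟨v, hv, hyv⟩ := List.mem_flatMap.mp hy
  have := (List.mem_filter.mp hyv).2
  simpa [beq_iff_eq] using (beq_iff_eq.mp this) ▸ hv

-- one stable reverse-insertion step = appending into the right bucket
theorem pv_insertBy_buckets {α : Type} (key : α → Int) (vs : List Int) (l : List α) (x : α)
    (hvs : vs.Pairwise (· > ·)) (hx : key x ∈ vs) :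
    PySem.List.insertBy (fun a b => decide (key b < key a)) x (pvBuckets key vs l)
      = pvBuckets key vs (l ++ [x]) := by
  induction vs generalizing l with
  | nil => simp at hx
  | cons v vs ih =>
      have hgt : ∀ v' ∈ vs, v' < v := (List.pairwise_cons.mp hvs).1
      have hvs' : vs.Pairwise (· > ·) := (List.pairwise_cons.mp hvs).2
      unfold pvBuckets
      simp only [List.flatMap_cons]
      by_cases hxv : key x = v
      · -- x lands at the end of the v-bucket, before all lower buckets
        have hfil : ∀ v' ∈ vs, (l ++ [x]).filter (fun a => key a == v')
            = l.filter (fun a => key a == v') := by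
          intro v' hv'
          have hne : key x ≠ v' := by have := hgt v' hv'; omega
          simp [List.filter_append, hne]
        rw [pv_insertBy_append _ _ _ _ (fun y hy => by
              have : key y = v := beq_iff_eq.mp (List.mem_filter.mp hy).2
              simp [this, hxv])]
        rw [pv_insertBy_front _ _ _ (fun y hy => by
              have : key y ∈ vs := pv_mem_buckets_key key vs l y hy
              have := hgt _ this
              simp [hxv]; omega)]
        rw [List.flatMap_congr hfil]
        simp [List.filter_append, hxv]
      · -- x belongs to a strictly lower bucket: pass over the v-bucket, recurse
        have hxvs : key x ∈ vs := by
          rcases List.mem_cons.mp hx with h | h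
          · exact absurd h hxv
          · exact h
        have hlt : key x < v := hgt _ hxvs
        rw [pv_insertBy_append _ _ _ _ (fun y hy => by
              have : key y = v := beq_iff_eq.mp (List.mem_filter.mp hy).2
              simp [this]; omega)]
        have ih' := ih l hvs' hxvs
        unfold pvBuckets at ih'
        rw [ih']
        have : (l ++ [x]).filter (fun a => key a == v) = l.filter (fun a => key a == v) := by
          simp [List.filter_append, hxv]
        rw [this]

-- Python's stable sorted(·, key, reverse=True) IS the descending-buckets concatenation.
theorem pv_sorted_rev_eq_buckets {α : Type} (key : α → Int) (vs : List Int) (l : List α)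
    (hvs : vs.Pairwise (· > ·)) (hl : ∀ a ∈ l, key a ∈ vs) :
    PySem.List.sorted l key true = pvBuckets key vs l := by
  rw [PySem.List.sorted_rev_eq_foldl_insertBy]
  induction l using List.reverseRecOn with
  | nil => simp [pvBuckets]
  | append_singleton l x ih =>
      rw [List.foldl_append]
      simp only [List.foldl_cons, List.foldl_nil]
      rw [ih (fun a ha => hl a (List.mem_append_left _ ha))]
      exact pv_insertBy_buckets key vs l x hvs (hl x (List.mem_append_right _ (List.mem_singleton_self x)))

-- insertBy commutes with map when the comparison factors through the map
theorem pv_insertBy_map {α β : Type} (f : α → β) (before : β → β → Bool) (x : α) (ys : List α) :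
    PySem.List.insertBy before (f x) (ys.map f)
      = (PySem.List.insertBy (fun a b => before (f a) (f b)) x ys).map f := by
  induction ys with
  | nil => rfl
  | cons y ys ih =>
      simp only [List.map_cons, PySem.List.insertBy]
      by_cases h : before (f x) (f y) = true
      · simp [h]
      · simp only [h, Bool.false_eq_true, if_false] at *
        simp [ih]

-- sorted over a mapped list = mapped sorted over the composed key
theorem pv_sorted_rev_map {α β κ : Type} [LinearOrder κ] (f : α → β) (key : β → κ) (l : List α) :
    PySem.List.sorted (l.map f) key true
      = (PySem.List.sorted l (fun a => key (f a)) true).map f := by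
  rw [PySem.List.sorted_rev_eq_foldl_insertBy, PySem.List.sorted_rev_eq_foldl_insertBy,
      List.foldl_map]
  suffices h : ∀ (acc : List α),
      l.foldl (fun acc x => PySem.List.insertBy (fun a b => decide (key b < key a)) (f x) acc) (acc.map f)
        = (l.foldl (fun acc x => PySem.List.insertBy (fun a b => decide (key (f b) < key (f a))) x acc) acc).map f by
    simpa using h []
  intro acc
  induction l generalizing acc with
  | nil => rfl
  | cons y l ih =>
      simp only [List.foldl_cons]
      rw [show PySem.List.insertBy (fun a b => decide (key b < key a)) (f y) (acc.map f)
            = (PySem.List.insertBy (fun a b => decide (key (f b) < key (f a))) y acc).map f from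
          pv_insertBy_map f _ y acc]
      exact ih _

-- getD after the bucket-filling fold
theorem pv_buckets_getD (l : List (String × Int)) (bs : List (List String))
    (hl : ∀ p ∈ l, p.2.toNat < bs.length) (c : Nat) :
    (l.foldl (fun bs wc => bs.set wc.2.toNat (bs.getD wc.2.toNat [] ++ [wc.1])) bs).getD c []
      = bs.getD c [] ++ (l.filter (fun p => p.2.toNat == c)).map (fun p => p.1) := by
  induction l generalizing bs with
  | nil => simp
  | cons p l ih =>
      simp only [List.foldl_cons]
      rw [ih _ (fun q hq => by
            rw [List.length_set]; exact hl q (List.mem_cons_of_mem _ hq))]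
      have hp : p.2.toNat < bs.length := hl p (List.mem_cons_self)
      by_cases hc : p.2.toNat = c
      · subst hc
        simp [List.getD, hp]
      · have : (p.2.toNat == c) = false := by simpa using hc
        simp [List.getD, hc, this]

-- ===== VERDICT (by name: the statement is the Claim_ definition above) =====
theorem extract_by_tfidf_py_spec : Claim_equal_extract_by_tfidf_py := by
  intro tokens top_k _
  show extract_by_tfidf_py tokens top_k = extract_by_tfidf_py_alt tokens top_k
  rcases heq : tokens with _ | ⟨t0, ts⟩
  · subst heq
    simp only [extract_by_tfidf_py, extract_by_tfidf_py_alt, PySem.List.slice]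
    simp [show (PySem.Dict.counter ([] : List String)).items = [] from rfl]
    exact Or.inr rfl
  · rw [← heq]
    have ht : 0 < tokens.length := by rw [heq]; simp
    simp only [extract_by_tfidf_py, extract_by_tfidf_py_alt]
    set items := (PySem.Dict.counter tokens).items with hitems
    set n := tokens.length with hn
    set vs := PySem.List.pyRange (n : Int) 0 (-1) with hvs
    -- facts about items
    have hkeys : ∀ p ∈ items, p.2 = (tokens.count p.1 : Int) ∧ 1 ≤ p.2 ∧ p.2 ≤ (n : Int) := by
      intro p hp
      rw [hitems, PySem.Dict.items_counter] at hp
      obtain ⟨w, hw, rfl⟩ := List.mem_map.mp hp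
      have hwmem : w ∈ tokens := (PySem.Set.mem_ofList tokens w).mp hw
      have h1 : 0 < tokens.count w := List.count_pos_iff.mpr hwmem
      have h2 : tokens.count w ≤ tokens.length := List.count_le_length
      refine ⟨rfl, ?_, ?_⟩
      · show (1 : Int) ≤ (tokens.count w : Int); exact_mod_cast h1
      · show ((tokens.count w : Int)) ≤ ((n : Int)); rw [hn]; exact_mod_cast h2
    have hmemvs : ∀ p ∈ items, p.2 ∈ vs := by
      intro p hp
      obtain ⟨-, h1, h2⟩ := hkeys p hp
      rw [hvs, PySem.List.mem_pyRange_neg_one]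
      omega
    have hvsdec : vs.Pairwise (· > ·) := by
      rw [hvs, PySem.List.pyRange_neg_one]
      exact List.pairwise_map.mpr (List.pairwise_lt_range.imp (by intro a b h; omega))
    -- ==== A side ====
    have hfresh : (items.foldl (fun d wc => d.insert wc.1 ((wc.2 : ℚ) / ((tokens.length : Int) : ℚ)))
          PySem.Dict.empty).items
        = items.map (fun wc => (wc.1, (wc.2 : ℚ) / ((tokens.length : Int) : ℚ))) := by
      have := PySem.Dict.items_foldl_insert_fresh items (fun wc => wc.1)
          (fun wc => (wc.2 : ℚ) / ((tokens.length : Int) : ℚ)) PySem.Dict.empty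
          (fun a _ => PySem.Dict.contains_empty _)
          (by
            have := PySem.Dict.nodup_keys_counter tokens
            simpa [PySem.Dict.keys, hitems] using this)
      simpa using this
    rw [hfresh, pv_sorted_rev_map]
    have hkeyeq : (fun (a : String × Int) =>
          ((fun (x : String × ℚ) => x.2) ((fun wc : String × Int => (wc.1, (wc.2 : ℚ) / ((tokens.length : Int) : ℚ))) a)))
        = fun a : String × Int => ((a.2 : ℚ) / ((tokens.length : Int) : ℚ)) := rfl
    have hsortkey : PySem.List.sorted items
          (fun a : String × Int => ((a.2 : ℚ) / ((tokens.length : Int) : ℚ))) true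
        = PySem.List.sorted items (fun a : String × Int => a.2) true := by
      rw [PySem.List.sorted_rev_eq_foldl_insertBy, PySem.List.sorted_rev_eq_foldl_insertBy]
      have hbefore : (fun (a b : String × Int) =>
            decide (((b.2 : ℚ) / ((tokens.length : Int) : ℚ)) < ((a.2 : ℚ) / ((tokens.length : Int) : ℚ))))
          = fun (a b : String × Int) => decide ((b.2 : Int) < a.2) := by
        funext a b
        have hq : (0 : ℚ) < ((tokens.length : ℕ) : ℚ) := by exact_mod_cast ht
        simp only [decide_eq_decide, Int.cast_natCast]
        rw [div_lt_div_iff_of_pos_right hq]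
        exact Int.cast_lt
      rw [hbefore]
    rw [hkeyeq, hsortkey,
        pv_sorted_rev_eq_buckets (fun a : String × Int => a.2) vs items hvsdec hmemvs]
    rw [pv_slice_map, List.map_map]
    have hcomp : ((fun p : String × ℚ => p.1) ∘ (fun wc : String × Int => (wc.1, (wc.2 : ℚ) / ((tokens.length : Int) : ℚ))))
        = fun p : String × Int => p.1 := rfl
    rw [hcomp, ← pv_slice_map]
    -- ==== B side ====
    have hbound : ∀ p ∈ items, p.2.toNat < (List.replicate (n + 1) ([] : List String)).length := by
      intro p hp
      obtain ⟨-, h1, h2⟩ := hkeys p hp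
      simp only [List.length_replicate]
      omega
    rw [PySem.List.foldl_append_eq_flatMap, List.nil_append]
    congr 1
    rw [List.flatMap_congr (fun c hc => pv_buckets_getD items _ hbound c.toNat)]
    have hcvs : ∀ c ∈ vs, 0 < c ∧ c ≤ (n : Int) := by
      intro c hc
      rw [hvs, PySem.List.mem_pyRange_neg_one] at hc
      omega
    unfold pvBuckets
    rw [List.map_flatMap]
    apply List.flatMap_congr
    intro c hc
    obtain ⟨hc1, hc2⟩ := hcvs c hc
    have hrep : (List.replicate (n + 1) ([] : List String)).getD c.toNat [] = [] :=
      List.getD_replicate _ (by omega)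
    rw [hrep, List.nil_append]
    congr 1
    apply List.filter_congr
    intro p hp
    obtain ⟨-, h1, h2⟩ := hkeys p hp
    by_cases h : p.2 = c
    · simp [h]
    · have : p.2.toNat ≠ c.toNat := by omega
      simp [h, this]
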